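-- pv_equiv track=rewrite | github.com/jk-jung/problem-solving | codewars/6kyu/6_Combinations xor sum.py | transform
-- ===== SOURCE A (Python) =====
-- from math import comb
--
-- def transform(A, y):
--     A, pos, r, cur = sorted(A), y - 1, 0, 0
--     for x in A:
--         while pos < x:
--             pos += 1
--             cur += comb(pos, y)
--         r ^= cur
--     return r
-- ===== SOURCE B (Python) =====
-- from math import comb
--
-- def transform(A, y):
--     # Hockey-stick identity: sum_{p=y}^{x} comb(p, y) == comb(x + 1, y + 1),
--     # so each element contributes comb(x + 1, y + 1) directly (0 when x < y).
--     r = 0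
--     for x in A:
--         if x >= y:
--             r ^= comb(x + 1, y + 1)
--     return r
-- ===== Notes on version B (the rewrite author's own statement) =====
-- stated objective: faster
-- what changed: Replaces the sort plus the cumulative while-loop that evaluates comb(pos, y) for every integer pos from y up to max(A) by a single pass that computes each element's cumulative sum in closed form via the hockey-stick identity comb(x+1, y+1), so no sort and no per-integer scan remain.
import Mathlib
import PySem

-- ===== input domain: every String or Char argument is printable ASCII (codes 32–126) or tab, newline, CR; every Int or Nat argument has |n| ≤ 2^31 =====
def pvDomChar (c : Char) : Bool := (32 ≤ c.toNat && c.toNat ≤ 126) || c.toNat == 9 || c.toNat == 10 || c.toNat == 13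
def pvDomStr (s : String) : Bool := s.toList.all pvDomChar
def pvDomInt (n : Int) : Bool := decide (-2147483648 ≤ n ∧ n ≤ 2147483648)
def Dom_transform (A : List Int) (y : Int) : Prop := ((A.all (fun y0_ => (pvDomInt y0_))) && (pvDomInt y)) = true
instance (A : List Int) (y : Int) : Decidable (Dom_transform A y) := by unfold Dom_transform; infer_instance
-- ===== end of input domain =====

-- B replaces A's sort + per-integer cumulative while-loop by a single pass using the
-- hockey-stick identity (each element contributes comb(x+1, y+1) directly); faster.

-- ===== PORT A =====

-- math.comb n k ported as CPython computes it: the multiplicative formula over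
-- min(k, n-k) factors (proved equal to Nat.choose below). Python raises ValueError on
-- negative arguments (such calls are excluded by Pre_transform); those cases return 0
-- and are never relied upon.
def combNat (n k : Nat) : Nat :=
  if n < k then 0
  else (List.range (min k (n - k))).foldl (fun acc i => acc * (n - i) / (i + 1)) 1

def pyComb (n k : Int) : Int :=
  if 0 ≤ n ∧ 0 ≤ k then (combNat n.toNat k.toNat : Int) else 0

-- the inner `while pos < x: pos += 1; cur += comb(pos, y)` loop of A
def transformAdv (y x pos cur : Int) : Int × Int :=
  if pos < x then transformAdv y x (pos + 1) (cur + pyComb (pos + 1) y) else (pos, cur)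
termination_by (x - pos).toNat
decreasing_by omega

-- one iteration of A's `for x in A` body, state (r, pos, cur)
def stepA (y : Int) (st : Int × Int × Int) (x : Int) : Int × Int × Int :=
  let pc := transformAdv y x st.2.1 st.2.2
  (PySem.Int.bxor st.1 pc.2, pc.1, pc.2)

def transform (A : List Int) (y : Int) : Int :=
  ((PySem.List.sorted A (fun v => v) false).foldl (stepA y) (0, y - 1, 0)).1

-- ===== PORT B =====

-- one iteration of B's loop: `if x >= y: r ^= comb(x + 1, y + 1)`
def stepB (y r x : Int) : Int :=
  if y ≤ x then PySem.Int.bxor r (pyComb (x + 1) (y + 1)) else r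

def transform_alt (A : List Int) (y : Int) : Int :=
  A.foldl (stepB y) 0

-- ===== PRECONDITION & SPEC =====
-- A raises ValueError (comb with negative second argument) exactly when y < 0 and
-- some element reaches the while loop, i.e. some x ∈ A has y ≤ x; Pre_ excludes that.
def Pre_transform (A : List Int) (y : Int) : Prop := 0 ≤ y ∨ ∀ x ∈ A, x < y
instance (A : List Int) (y : Int) : Decidable (Pre_transform A y) := by unfold Pre_transform; infer_instance

def pvWitness_transform : List Int × Int := ([1, 3, 3, 0], 2)

def Spec_transform (A : List Int) (y : Int) (out : Int) : Prop := out = transform_alt A y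
instance (A : List Int) (y : Int) (out : Int) : Decidable (Spec_transform A y out) := by unfold Spec_transform; infer_instance

-- ===== CLAIM (what is proved, stated in full; the proofs are below) =====
def Claim_equal_transform : Prop := ∀ (A : List Int) (y : Int), Dom_transform A y → Pre_transform A y → Spec_transform A y (transform A y)

-- ===== LEMMAS AND PROOFS =====

lemma bxor_eq_xor (a b : Int) : PySem.Int.bxor a b = Int.xor a b := by
  rcases a with m | m <;> rcases b with n | n <;>
    simp [PySem.Int.bxor, Int.xor] <;> omega

lemma bxor_assoc (a b c : Int) :
    PySem.Int.bxor (PySem.Int.bxor a b) c = PySem.Int.bxor a (PySem.Int.bxor b c) := by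
  rcases a with m | m <;> rcases b with n | n <;> rcases c with p | p <;>
    simp [bxor_eq_xor, Int.xor, Nat.xor_assoc]

lemma bxor_right_comm (r a b : Int) :
    PySem.Int.bxor (PySem.Int.bxor r a) b = PySem.Int.bxor (PySem.Int.bxor r b) a := by
  rw [bxor_assoc, bxor_assoc, PySem.Int.bxor_comm a b]

lemma combFold (n : Nat) : ∀ j, j ≤ n →
    (List.range j).foldl (fun acc i => acc * (n - i) / (i + 1)) 1 = n.choose j := by
  intro j hj
  induction j with
  | zero => simp
  | succ j ih =>
    rw [List.range_succ, List.foldl_append, ih (by omega)]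
    simp only [List.foldl_cons, List.foldl_nil]
    rw [← Nat.choose_succ_right_eq n j, Nat.mul_div_cancel _ (Nat.succ_pos j)]

lemma combNat_eq_choose (n k : Nat) : combNat n k = n.choose k := by
  unfold combNat
  split
  · rename_i h; exact (Nat.choose_eq_zero_of_lt h).symm
  · rename_i h
    rcases Nat.le_total k (n - k) with hk | hk
    · rw [min_eq_left hk, combFold n k (by omega)]
    · rw [min_eq_right hk, combFold n (n - k) (by omega), Nat.choose_symm (by omega)]

lemma pyComb_zero_of_le (m y : Int) (h0 : 0 ≤ m) (h : m ≤ y) : pyComb m (y + 1) = 0 := by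
  have h1 : 0 ≤ y + 1 := by omega
  simp only [pyComb, h0, h1, and_self, if_true, combNat_eq_choose]
  have : m.toNat < (y + 1).toNat := by omega
  simp [Nat.choose_eq_zero_of_lt this]

lemma pascal (y pos : Int) (hy : 0 ≤ y) (hpos : y - 1 ≤ pos) :
    pyComb (pos + 1) (y + 1) + pyComb (pos + 1) y = pyComb (pos + 2) (y + 1) := by
  have h1 : 0 ≤ pos + 1 := by omega
  have h2 : 0 ≤ pos + 2 := by omega
  have h3 : 0 ≤ y + 1 := by omega
  simp only [pyComb, h1, h2, h3, hy, and_self, if_true, combNat_eq_choose]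
  have e1 : (pos + 2).toNat = (pos + 1).toNat + 1 := by omega
  have e2 : (y + 1).toNat = y.toNat + 1 := by omega
  rw [e1, e2, Nat.choose_succ_succ]
  push_cast
  ring

lemma adv_spec (y x pos : Int) (hy : 0 ≤ y) (hpos : y - 1 ≤ pos) :
    transformAdv y x pos (pyComb (pos + 1) (y + 1))
      = (max pos x, pyComb (max pos x + 1) (y + 1)) := by
  rw [transformAdv]
  split
  · rename_i h
    rw [pascal y pos hy hpos]
    have heq : pos + 2 = pos + 1 + 1 := by ring
    rw [heq]
    rw [adv_spec y x (pos + 1) hy (by omega)]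
    have : max (pos + 1) x = max pos x := by omega
    rw [this]
  · rename_i h
    have : max pos x = pos := by omega
    rw [this]
termination_by (x - pos).toNat
decreasing_by omega

lemma foldA (y : Int) (hy : 0 ≤ y) (l : List Int) (hpw : l.Pairwise (· ≤ ·)) :
    ∀ (pos r : Int), y - 1 ≤ pos → (∀ x ∈ l, pos ≤ max (y - 1) x) →
      (l.foldl (stepA y) (r, pos, pyComb (pos + 1) (y + 1))).1 = l.foldl (stepB y) r := by
  induction l with
  | nil => intro pos r _ _; simp
  | cons x t ih =>
    intro pos r hpos hbound
    rcases List.pairwise_cons.mp hpw with ⟨hxt, hpwt⟩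
    have hx : pos ≤ max (y - 1) x := hbound x (List.mem_cons_self)
    have hmax : max pos x = max (y - 1) x := by omega
    simp only [List.foldl_cons, stepA, adv_spec y x pos hy hpos]
    have hcur : PySem.Int.bxor r (pyComb (max pos x + 1) (y + 1)) = stepB y r x := by
      by_cases hxy : y ≤ x
      · have : max pos x = x := by omega
        rw [this, stepB, if_pos hxy]
      · have hm : max pos x + 1 ≤ y := by omega
        rw [pyComb_zero_of_le _ _ (by omega) hm, PySem.Int.bxor_zero, stepB, if_neg hxy]
    rw [hcur, ih hpwt (max pos x) (stepB y r x) (by omega)]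
    intro z hz
    have hxz := hxt z hz
    have := hbound z (List.mem_cons_of_mem _ hz)
    omega

lemma foldB_perm (y : Int) {l1 l2 : List Int} (h : l1.Perm l2) (r : Int) :
    l1.foldl (stepB y) r = l2.foldl (stepB y) r := by
  refine @List.Perm.foldl_eq _ _ (stepB y) _ _ ⟨fun b a1 a2 => ?_⟩ h r
  unfold stepB
  split_ifs <;> first | rfl | apply bxor_right_comm

lemma foldA_neg (y : Int) (l : List Int) (h : ∀ x ∈ l, x < y) :
    ∀ r : Int, (l.foldl (stepA y) (r, y - 1, 0)).1 = r := by
  induction l with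
  | nil => intro r; simp
  | cons x t ih =>
    intro r
    have hx : x < y := h x List.mem_cons_self
    have hadv : transformAdv y x (y - 1) 0 = (y - 1, 0) := by
      rw [transformAdv, if_neg (by omega)]
    simp only [List.foldl_cons, stepA, hadv, PySem.Int.bxor_zero]
    exact ih (fun z hz => h z (List.mem_cons_of_mem _ hz)) r

lemma foldB_neg (y : Int) (l : List Int) (h : ∀ x ∈ l, x < y) :
    ∀ r : Int, l.foldl (stepB y) r = r := by
  induction l with
  | nil => intro r; simp
  | cons x t ih =>
    intro r
    have hx : x < y := h x List.mem_cons_self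
    simp only [List.foldl_cons, stepB, if_neg (by omega : ¬ y ≤ x)]
    exact ih (fun z hz => h z (List.mem_cons_of_mem _ hz)) r

-- ===== VERDICT (by name: the statement is the Claim_ definition above) =====
theorem transform_spec : Claim_equal_transform := by
  intro A y _ hpre
  unfold Spec_transform transform transform_alt
  rcases hpre with hy | hlt
  · have key := foldA y hy _ (by simpa using PySem.List.sorted_pairwise A (fun v => v))
        (y - 1) 0 (by omega) (fun x _ => le_max_left _ _)
    rw [pyComb_zero_of_le (y - 1 + 1) y (by omega) (by omega)] at key
    exact key.trans (foldB_perm y (PySem.List.sorted_perm A (fun v => v) false) 0)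
  · have hS : ∀ x ∈ PySem.List.sorted A (fun v => v) false, x < y := by
      intro x hx
      exact hlt x ((PySem.List.mem_sorted A (fun v => v) false x).mp hx)
    rw [foldA_neg y _ hS 0, foldB_neg y A hlt 0]
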